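-- pv_equiv track=rewrite | github.com/PavlinGergov/CheckiO | Home/Feed_pigeons.py | feed_pigeons
-- ===== SOURCE A (Python) =====
-- def feed_pigeons(n):
--     all_pigeons = []
--     counter = 0
--     pigeons = 1
--     while n > 0:
--         i = 0
--         while i < pigeons:
--             all_pigeons.append(0)
--             i += 1
--         for index, bird in enumerate(all_pigeons):
--             if n > 0:
--                 all_pigeons[index] += 1
--                 n -= 1
--             else:
--                 break
--         pigeons += 1
--     for pign in all_pigeons:
--         if pign != 0:
--             counter += 1
--
--     return counter
-- ===== SOURCE B (Python) =====
-- def feed_pigeons(n):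
--     if n <= 0:
--         return 0
--     m = 0
--     while (m + 1) * (m + 2) * (m + 3) // 6 <= n:
--         m += 1
--     r = n - m * (m + 1) * (m + 2) // 6
--     return max(m * (m + 1) // 2, r)
-- ===== Notes on version B (the rewrite author's own statement) =====
-- stated objective: faster
-- what changed: Replaces the crumb-by-crumb list simulation with a closed-form computation: find the largest m whose m-th tetrahedral number is at most n, then take the max of the m-th triangular number and the remaining crumbs.
import Mathlib
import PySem

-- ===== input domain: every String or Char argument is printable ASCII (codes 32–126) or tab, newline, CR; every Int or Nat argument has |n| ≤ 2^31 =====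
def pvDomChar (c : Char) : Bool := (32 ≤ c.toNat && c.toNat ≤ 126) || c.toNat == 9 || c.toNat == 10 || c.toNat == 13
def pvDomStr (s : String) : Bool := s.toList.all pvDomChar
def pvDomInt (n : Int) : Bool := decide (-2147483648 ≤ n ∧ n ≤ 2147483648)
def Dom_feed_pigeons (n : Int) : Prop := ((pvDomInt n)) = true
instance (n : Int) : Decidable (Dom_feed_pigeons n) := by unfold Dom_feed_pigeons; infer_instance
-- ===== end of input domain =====

-- B replaces A's crumb-by-crumb list simulation by a closed-form computation with
-- triangular/tetrahedral numbers (objective: faster, asymptotically).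

-- ===== PORT A =====
-- inner `while i < pigeons: all_pigeons.append(0); i += 1`
def pvAppendZeros (ap : List Int) (i pigeons : Int) : List Int :=
  if h : i < pigeons then pvAppendZeros (ap ++ [0]) (i + 1) pigeons else ap
termination_by (pigeons - i).toNat
decreasing_by omega

-- `for index, bird in enumerate(all_pigeons): if n > 0: all_pigeons[index] += 1; n -= 1 else: break`
def pvFeed (ap : List Int) (n : Int) : List Int × Int :=
  match ap with
  | [] => ([], n)
  | x :: xs =>
      if 0 < n then ((x + 1) :: (pvFeed xs (n - 1)).1, (pvFeed xs (n - 1)).2)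
      else (x :: xs, n)

-- `for pign in all_pigeons: if pign != 0: counter += 1`
def pvCount (ap : List Int) : Int :=
  ap.foldl (fun c x => if x ≠ 0 then c + 1 else c) 0

-- outer `while n > 0` loop; the dead `else` of the inner guard only makes the
-- recursion total (each real iteration strictly decreases n, proved in the lemmas)
def pvLoopA (ap : List Int) (n pigeons : Int) : Int :=
  if 0 < n then
    let ap1 := pvAppendZeros ap 0 pigeons
    let fr := pvFeed ap1 n
    if h : fr.2.toNat < n.toNat then pvLoopA fr.1 fr.2 (pigeons + 1)
    else pvCount fr.1
  else pvCount ap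
termination_by n.toNat
decreasing_by omega

def feed_pigeons (n : Int) : Int := pvLoopA [] n 1

-- ===== PORT B =====
-- `while (m+1)*(m+2)*(m+3)//6 <= n: m += 1`; the dead inner `else` is a totality
-- guard only (when the loop guard holds with 0 ≤ m, m+1 ≤ n, so the measure drops)
def pvBLoop (m n : Int) : Int :=
  if PySem.Int.floordiv ((m + 1) * (m + 2) * (m + 3)) 6 ≤ n then
    if h : (n - (m + 1)).toNat < (n - m).toNat then pvBLoop (m + 1) n else m
  else m
termination_by (n - m).toNat
decreasing_by omega

def feed_pigeons_alt (n : Int) : Int :=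
  if n ≤ 0 then 0
  else
    let m := pvBLoop 0 n
    let r := n - PySem.Int.floordiv (m * (m + 1) * (m + 2)) 6
    max (PySem.Int.floordiv (m * (m + 1)) 2) r

-- ===== PRECONDITION & SPEC =====
def Spec_feed_pigeons (n : Int) (out : Int) : Prop := out = feed_pigeons_alt n
instance (n : Int) (out : Int) : Decidable (Spec_feed_pigeons n out) := by unfold Spec_feed_pigeons; infer_instance

-- ===== CLAIM (what is proved, stated in full; the proofs are below) =====
def Claim_equal_feed_pigeons : Prop := ∀ (n : Int), Dom_feed_pigeons n → Spec_feed_pigeons n (feed_pigeons n)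

-- ===== LEMMAS AND PROOFS =====

-- triangular and tetrahedral numbers (proof-side helpers)
def pvTn : Nat → Nat
  | 0 => 0
  | q + 1 => pvTn q + (q + 1)

def pvTetn : Nat → Nat
  | 0 => 0
  | q + 1 => pvTetn q + pvTn (q + 1)

theorem pvTn_succ_le (q : Nat) : q + 1 ≤ pvTn (q + 1) := by
  simp [pvTn]

theorem pvTetn_succ_le (q : Nat) : q + 1 ≤ pvTetn (q + 1) := by
  have := pvTn_succ_le q
  simp [pvTetn]; omega

theorem two_mul_pvTn (q : Nat) : 2 * pvTn q = q * (q + 1) := by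
  induction q with
  | zero => simp [pvTn]
  | succ k ih => simp only [pvTn]; ring_nf; ring_nf at ih; omega

theorem six_mul_pvTetn (q : Nat) : 6 * pvTetn q = q * (q + 1) * (q + 2) := by
  induction q with
  | zero => simp [pvTetn]
  | succ k ih =>
      have h2 := two_mul_pvTn (k + 1)
      simp only [pvTetn]
      ring_nf; ring_nf at ih h2
      nlinarith [ih, h2]

theorem pv_floordiv_exact (a b t : Int) (hb : 0 < b) (h : a = b * t) :
    PySem.Int.floordiv a b = t := by
  rw [PySem.Int.floordiv_eq_iff_of_pos hb]
  constructor <;> nlinarith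

theorem pv_floordiv_Tn (q : Nat) :
    PySem.Int.floordiv ((q : Int) * ((q : Int) + 1)) 2 = (pvTn q : Int) := by
  apply pv_floordiv_exact _ _ _ (by norm_num)
  have h' : ((2 * pvTn q : Nat) : Int) = ((q * (q + 1) : Nat) : Int) := by
    exact_mod_cast two_mul_pvTn q
  push_cast at h'
  linarith

theorem pv_floordiv_Tetn (q : Nat) :
    PySem.Int.floordiv ((q : Int) * ((q : Int) + 1) * ((q : Int) + 2)) 6 = (pvTetn q : Int) := by
  apply pv_floordiv_exact _ _ _ (by norm_num)
  have h' : ((6 * pvTetn q : Nat) : Int) = ((q * (q + 1) * (q + 2) : Nat) : Int) := by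
    exact_mod_cast six_mul_pvTetn q
  push_cast at h'
  linarith

-- the final count A computes, expressed as a recursion over rounds
def pvH (N : Int) (q : Nat) : Int :=
  if (pvTetn (q + 1) : Int) ≤ N then
    if h : (N - ((q : Int) + 1)).toNat < (N - (q : Int)).toNat then pvH N (q + 1) else 0
  else max (pvTn q : Int) (N - pvTetn q)
termination_by (N - (q : Int)).toNat
decreasing_by omega

theorem pvH_step (N : Int) (q : Nat) (h : (pvTetn (q + 1) : Int) ≤ N) :
    pvH N q = pvH N (q + 1) := by
  have hle := pvTetn_succ_le q
  have hdec : (N - ((q : Int) + 1)).toNat < (N - (q : Int)).toNat := by omega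
  rw [pvH, if_pos h, dif_pos hdec]

theorem pvH_stop (N : Int) (q : Nat) (h : ¬ (pvTetn (q + 1) : Int) ≤ N) :
    pvH N q = max (pvTn q : Int) (N - pvTetn q) := by
  rw [pvH, if_neg h]

-- pvAppendZeros appends (pigeons - i) zeros
theorem pvAppendZeros_eq (ap : List Int) (i pigeons : Int) :
    pvAppendZeros ap i pigeons = ap ++ List.replicate (pigeons - i).toNat 0 := by
  fun_induction pvAppendZeros ap i pigeons with
  | case1 ap i h ih =>
      rw [ih]
      have hnz : (pigeons - i).toNat = (pigeons - (i + 1)).toNat + 1 := by omega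
      rw [hnz, List.replicate_succ, List.append_assoc]
      rfl
  | case2 ap i h =>
      have hz : (pigeons - i).toNat = 0 := by omega
      simp [hz]

-- pvFeed bumps the first n elements and returns the leftover crumbs
theorem pvFeed_eq (ap : List Int) (n : Int) (hn : 0 ≤ n) :
    pvFeed ap n =
      ((ap.take n.toNat).map (· + 1) ++ ap.drop n.toNat,
       n - min n (ap.length : Int)) := by
  induction ap generalizing n with
  | nil => simp [pvFeed]; omega
  | cons x xs ih =>
      by_cases h : 0 < n
      · rw [pvFeed, if_pos h, ih (n - 1) (by omega)]
        have h1 : n.toNat = (n - 1).toNat + 1 := by omega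
        rw [Prod.mk.injEq]
        constructor
        · rw [h1]; simp
        · simp only [List.length_cons]; push_cast; omega
      · rw [pvFeed, if_neg h]
        have h0 : n = 0 := by omega
        subst h0
        simp
        omega

theorem pvCount_eq (ap : List Int) :
    pvCount ap = (ap.countP (fun x => !decide (x = 0)) : Int) := by
  unfold pvCount
  simpa using PySem.List.foldl_ite_add_one (fun x => x ≠ 0) ap 0

theorem pv_countP_pos (P : List Int) (hP : ∀ x ∈ P, 0 < x) :
    P.countP (fun x => !decide (x = 0)) = P.length := by
  rw [List.countP_eq_length]
  intro x hx
  have := hP x hx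
  simp
  omega

theorem pvCount_pos (P : List Int) (hP : ∀ x ∈ P, 0 < x) :
    pvCount P = (P.length : Int) := by
  rw [pvCount_eq, pv_countP_pos P hP]

-- count of nonzeros after feeding f crumbs to P ++ zeros: max |P| f
theorem pv_count_aux (P : List Int) (z f : Nat) (hP : ∀ x ∈ P, 0 < x)
    (hf : f ≤ P.length + z) :
    (((P ++ List.replicate z (0 : Int)).take f).map (· + 1) ++
        (P ++ List.replicate z (0 : Int)).drop f).countP (fun x => !decide (x = 0))
      = max P.length f := by
  rw [List.countP_append, List.countP_map]
  have htake : ∀ y ∈ (P ++ List.replicate z (0 : Int)).take f,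
      ((fun x : Int => !decide (x = 0)) ∘ (· + 1)) y = true := by
    intro y hy
    have hy' := List.mem_of_mem_take hy
    have h0 : 0 ≤ y := by
      rcases List.mem_append.mp hy' with h1 | h1
      · exact le_of_lt (hP y h1)
      · simp [List.eq_of_mem_replicate h1]
    simp
    omega
  have h1 := List.countP_eq_length.mpr htake
  have hlt : ((P ++ List.replicate z (0 : Int)).take f).length = f := by
    rw [List.length_take]
    simp
    omega
  rw [h1, hlt]
  by_cases hc : f ≤ P.length
  · have hdrop : (P ++ List.replicate z (0 : Int)).drop f
        = P.drop f ++ List.replicate z (0 : Int) := by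
      rw [List.drop_append]
      have : f - P.length = 0 := by omega
      rw [this, List.drop_zero]
    rw [hdrop, List.countP_append]
    have h2 : (P.drop f).countP (fun x => !decide (x = 0)) = (P.drop f).length :=
      pv_countP_pos _ (fun y hy => hP y (List.mem_of_mem_drop hy))
    have h3 : (List.replicate z (0 : Int)).countP (fun x => !decide (x = 0)) = 0 := by
      rw [List.countP_eq_zero]
      intro a ha
      simp [List.eq_of_mem_replicate ha]
    rw [h2, h3, List.length_drop]
    omega
  · have hdrop : (P ++ List.replicate z (0 : Int)).drop f
        = List.replicate (z - (f - P.length)) (0 : Int) := by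
      rw [List.drop_append, List.drop_eq_nil_of_le (by omega),
        List.nil_append, List.drop_replicate]
    rw [hdrop]
    have h3 : (List.replicate (z - (f - P.length)) (0 : Int)).countP
        (fun x => !decide (x = 0)) = 0 := by
      rw [List.countP_eq_zero]
      intro a ha
      simp [List.eq_of_mem_replicate ha]
    rw [h3]
    omega

-- main invariant: from a state of pvTn q all-fed pigeons with n > 0 crumbs left,
-- A's loop returns pvH (n + pvTetn q) q
theorem pvM (k : Nat) : ∀ (n : Int) (q : Nat) (P : List Int),
    n.toNat ≤ k → (∀ x ∈ P, 0 < x) → P.length = pvTn q → 0 < n →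
    pvLoopA P n ((q : Int) + 1) = pvH (n + pvTetn q) q := by
  induction k with
  | zero => intro n q P hk _ _ hn; omega
  | succ k ih =>
      intro n q P hk hP hlen hn
      have eTn : pvTn (q + 1) = pvTn q + (q + 1) := rfl
      have eTet : pvTetn (q + 1) = pvTetn q + pvTn (q + 1) := rfl
      have hTq1 : q + 1 ≤ pvTn (q + 1) := pvTn_succ_le q
      rw [pvLoopA, if_pos hn]
      have hz := pvAppendZeros_eq P 0 ((q : Int) + 1)
      have hzn : (((q : Int) + 1) - 0).toNat = q + 1 := by omega
      rw [hzn] at hz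
      simp only [hz]
      have hlen1 : (P ++ List.replicate (q + 1) (0 : Int)).length = pvTn (q + 1) := by
        rw [List.length_append, List.length_replicate, hlen, eTn]
      have hlen1c : ((P ++ List.replicate (q + 1) (0 : Int)).length : Int)
          = (pvTn (q + 1) : Int) := by exact_mod_cast hlen1
      have hfeed := pvFeed_eq (P ++ List.replicate (q + 1) (0 : Int)) n (le_of_lt hn)
      by_cases hfull : (pvTn (q + 1) : Int) ≤ n
      · -- full round
        have hfr1 : (pvFeed (P ++ List.replicate (q + 1) (0 : Int)) n).1
            = (P ++ List.replicate (q + 1) (0 : Int)).map (· + 1) := by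
          rw [hfeed]
          have ht : (P ++ List.replicate (q + 1) (0 : Int)).take n.toNat
              = P ++ List.replicate (q + 1) (0 : Int) := by
            apply List.take_of_length_le; rw [hlen1]; omega
          have hd : (P ++ List.replicate (q + 1) (0 : Int)).drop n.toNat = [] := by
            apply List.drop_eq_nil_of_le; rw [hlen1]; omega
          rw [ht, hd, List.append_nil]
        have hfr2 : (pvFeed (P ++ List.replicate (q + 1) (0 : Int)) n).2
            = n - (pvTn (q + 1) : Int) := by
          rw [hfeed]
          simp only
          rw [hlen1c, min_eq_right hfull]
        simp only [hfr1, hfr2]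
        have hP' : ∀ x ∈ (P ++ List.replicate (q + 1) (0 : Int)).map (· + 1), 0 < x := by
          intro x hx
          rcases List.mem_map.mp hx with ⟨y, hy, rfl⟩
          rcases List.mem_append.mp hy with h1 | h1
          · have := hP y h1; omega
          · simp [List.eq_of_mem_replicate h1]
        have hlen' : ((P ++ List.replicate (q + 1) (0 : Int)).map (· + 1)).length
            = pvTn (q + 1) := by rw [List.length_map, hlen1]
        have hstep : pvH (n + (pvTetn q : Int)) q = pvH (n + (pvTetn q : Int)) (q + 1) := by
          apply pvH_step
          omega
        have hguard : (n - (pvTn (q + 1) : Int)).toNat < n.toNat := by omega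
        rw [dif_pos hguard]
        by_cases hgt : (pvTn (q + 1) : Int) < n
        · -- more crumbs remain: recurse
          rw [show ((q : Int) + 1) + 1 = ((q + 1 : Nat) : Int) + 1 by push_cast; ring]
          rw [ih (n - (pvTn (q + 1) : Int)) (q + 1) _ (by omega) hP' hlen' (by omega)]
          rw [show n - (pvTn (q + 1) : Int) + (pvTetn (q + 1) : Int)
              = n + (pvTetn q : Int) by push_cast [eTet]; ring]
          rw [hstep]
        · -- n = pvTn (q+1): next iteration sees n' = 0 and stops
          have hne : n = (pvTn (q + 1) : Int) := by omega
          rw [pvLoopA, if_neg (by omega)]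
          rw [pvCount_pos _ hP', hlen']
          have eTet2 : pvTetn (q + 1 + 1) = pvTetn (q + 1) + pvTn (q + 1 + 1) := rfl
          have hTq2 : q + 1 + 1 ≤ pvTn (q + 1 + 1) := pvTn_succ_le (q + 1)
          rw [hstep, pvH_stop _ _ (by omega)]
          omega
      · -- partial round: all n crumbs used, loop exits next iteration
        have hfr2 : (pvFeed (P ++ List.replicate (q + 1) (0 : Int)) n).2 = 0 := by
          rw [hfeed]
          simp only
          rw [min_eq_left (by omega)]
          ring
        have hfr1 : (pvFeed (P ++ List.replicate (q + 1) (0 : Int)) n).1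
            = ((P ++ List.replicate (q + 1) (0 : Int)).take n.toNat).map (· + 1) ++
              (P ++ List.replicate (q + 1) (0 : Int)).drop n.toNat := by
          rw [hfeed]
        simp only [hfr1, hfr2]
        have hguard : (0 : Int).toNat < n.toNat := by omega
        rw [dif_pos hguard]
        rw [pvLoopA, if_neg (by omega)]
        rw [pvCount_eq, pv_count_aux P (q + 1) n.toNat hP (by omega)]
        rw [pvH_stop _ _ (by omega)]
        push_cast [Nat.cast_max]
        omega

-- B's search loop computes the same function pvH
theorem pvBH (q : Nat) (N : Int) :
    pvH N q =
      max (PySem.Int.floordiv (pvBLoop (q : Int) N * (pvBLoop (q : Int) N + 1)) 2)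
        (N - PySem.Int.floordiv
          (pvBLoop (q : Int) N * (pvBLoop (q : Int) N + 1) * (pvBLoop (q : Int) N + 2)) 6) := by
  fun_induction pvH N q with
  | case1 q hguard hdec ih =>
      have hfd : PySem.Int.floordiv (((q : Int) + 1) * ((q : Int) + 2) * ((q : Int) + 3)) 6
          = (pvTetn (q + 1) : Int) := by
        have h := pv_floordiv_Tetn (q + 1)
        push_cast at h
        convert h using 3
      have hle := pvTetn_succ_le q
      rw [pvBLoop, if_pos (by rw [hfd]; exact hguard), dif_pos (by omega)]
      rw [show ((q : Int) + 1) = ((q + 1 : Nat) : Int) by push_cast; ring]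
      exact ih
  | case2 q hguard hdec =>
      have hle := pvTetn_succ_le q
      omega
  | case3 q hguard =>
      have hfd : PySem.Int.floordiv (((q : Int) + 1) * ((q : Int) + 2) * ((q : Int) + 3)) 6
          = (pvTetn (q + 1) : Int) := by
        have h := pv_floordiv_Tetn (q + 1)
        push_cast at h
        convert h using 3
      rw [pvBLoop, if_neg (by rw [hfd]; exact hguard)]
      rw [pv_floordiv_Tn q, pv_floordiv_Tetn q]

-- ===== VERDICT (by name: the statement is the Claim_ definition above) =====
theorem feed_pigeons_spec : Claim_equal_feed_pigeons := by
  intro n _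
  unfold Spec_feed_pigeons feed_pigeons feed_pigeons_alt
  by_cases hn : 0 < n
  · rw [if_neg (by omega)]
    have hM := pvM n.toNat n 0 [] le_rfl (by simp) (by simp [pvTn]) hn
    simp only [Nat.cast_zero, zero_add] at hM
    have h0 : (pvTetn 0 : Int) = 0 := by simp [pvTetn]
    rw [h0, add_zero] at hM
    rw [hM, pvBH 0 n]
    norm_num
  · rw [pvLoopA, if_neg hn, if_pos (by omega)]
    simp [pvCount]
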